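-- pv_equiv track=rewrite | github.com/lenk6663/Search | search.py | search
-- ===== SOURCE A (Python) =====
-- class Borders:
--     def __init__(self, start: int, end: int):
--         self.start = start
--         self.end = end
--
-- def search(string : str, lookup : str) -> str:
--     all_of_borders = []
--     j = 0
--
--     for i in range(len(string)):
--         if string[i] == lookup[j]:
--             if j == 0:
--                 borders = Borders(i, -1)
--             if j == (len(lookup) - 1):
--                 borders.end = i + 1
--                 all_of_borders.append(borders)
--                 j = 0
--             else: j += 1
--         else: j = 0
--
--     for borders in all_of_borders:
--         string = string[0 : borders.start] + "_" +string[borders.start : borders.end] + "_" + string[borders.end: len(string)]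
--         for border in all_of_borders:
--             border.start += 2
--             border.end += 2
--
--     return string
-- ===== SOURCE B (Python) =====
-- def search(string: str, lookup: str) -> str:
--     out = []
--     buf = []
--     j = 0
--     for ch in string:
--         if ch == lookup[j]:
--             buf.append(ch)
--             if j == len(lookup) - 1:
--                 out.append("_")
--                 out.extend(buf)
--                 out.append("_")
--                 buf = []
--                 j = 0
--             else:
--                 j += 1
--         else:
--             out.extend(buf)
--             buf = []
--             out.append(ch)
--             j = 0
--     out.extend(buf)
--     return "".join(out)
-- ===== Notes on version B (the rewrite author's own statement) =====
-- stated objective: alternative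
-- what changed: B replaces A's two-phase border-table algorithm (collect match intervals, then re-slice and rebuild the whole string once per match while shifting every stored border by +2) with a single streaming pass that buffers the current candidate match and flushes it wrapped in underscores (or unmarked on a mismatch), so no border table and no post-pass insertion/shifting exist.
-- outside the precondition, e.g. on search('ab', ''): A raises IndexError, B raises IndexError
import Mathlib
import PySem

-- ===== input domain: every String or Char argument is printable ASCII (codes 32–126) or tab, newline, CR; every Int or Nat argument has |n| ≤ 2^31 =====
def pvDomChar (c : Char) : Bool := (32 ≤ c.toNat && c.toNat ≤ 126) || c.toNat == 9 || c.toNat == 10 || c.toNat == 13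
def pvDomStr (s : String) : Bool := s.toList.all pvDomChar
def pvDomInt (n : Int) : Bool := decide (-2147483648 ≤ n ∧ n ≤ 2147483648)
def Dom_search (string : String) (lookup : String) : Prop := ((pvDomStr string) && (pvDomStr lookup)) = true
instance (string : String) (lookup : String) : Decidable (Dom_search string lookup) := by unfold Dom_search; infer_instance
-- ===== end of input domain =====

-- B replaces A's two-phase border-table algorithm (collect match intervals, then rebuild
-- the whole string once per match while shifting every stored border by +2) with a single
-- streaming pass that buffers the current candidate match and flushes it wrapped in '_'.

-- ===== PORT A =====
-- One iteration of A's scanning loop; state = (all_of_borders, j, borders).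
-- Python's `borders` variable is unassigned until the first j==0 match; the dummy
-- (0, -1) initial value is never read before being overwritten.
def searchStepA (s lk : List Char) (st : List (Int × Int) × Int × (Int × Int)) (i : Int) :
    List (Int × Int) × Int × (Int × Int) :=
  let (bs, j, borders) := st
  if PySem.List.pyGet? s i = PySem.List.pyGet? lk j then
    let borders := if j = 0 then (i, (-1 : Int)) else borders
    if j = (lk.length : Int) - 1 then
      (bs ++ [(borders.1, i + 1)], 0, (borders.1, i + 1))
    else (bs, j + 1, borders)
  else (bs, 0, borders)

-- A's second loop: string = string[0:start] + "_" + string[start:end] + "_" + string[end:len(string)],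
-- then every Borders object is shifted by +2.  The Python also mutates the already-consumed
-- objects, but those are never read again, so the port shifts the remaining list.
def searchInsertA (bs : List (Int × Int)) (s : List Char) : List Char :=
  match bs with
  | [] => s
  | (a, b) :: rest =>
      let s' := PySem.List.slice s (some 0) (some a) ++ '_' ::
        (PySem.List.slice s (some a) (some b) ++ '_' ::
          PySem.List.slice s (some b) (some (s.length : Int)))
      searchInsertA (rest.map (fun p => (p.1 + 2, p.2 + 2))) s'
  termination_by bs.length
  decreasing_by simp

def search (string : String) (lookup : String) : String :=
  let s := string.toList
  let st := (PySem.List.pyRange 0 (s.length : Int) 1).foldl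
    (searchStepA s lookup.toList) ([], 0, (0, -1))
  String.ofList (searchInsertA st.1 s)

-- ===== PORT B =====
-- One iteration of B's streaming loop; state = (out, buf, j).
def searchStepB (lk : List Char) (st : List Char × List Char × Int) (ch : Char) :
    List Char × List Char × Int :=
  let (out, buf, j) := st
  if some ch = PySem.List.pyGet? lk j then
    let buf := buf ++ [ch]
    if j = (lk.length : Int) - 1 then (out ++ '_' :: (buf ++ ['_']), [], 0)
    else (out, buf, j + 1)
  else (out ++ (buf ++ [ch]), [], 0)

def search_alt (string : String) (lookup : String) : String :=
  let r := string.toList.foldl (searchStepB lookup.toList) ([], [], 0)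
  String.ofList (r.1 ++ r.2.1)

-- ===== PRECONDITION & SPEC =====
-- Pre_ excludes only the inputs where Python A raises IndexError: lookup == "" with a
-- non-empty string (lookup[j] on an empty lookup); B raises the same IndexError there.
def Pre_search (string : String) (lookup : String) : Prop := string = "" ∨ lookup ≠ ""
instance (string : String) (lookup : String) : Decidable (Pre_search string lookup) := by
  unfold Pre_search; infer_instance

def pvWitness_search : String × String := ("abcab", "ab")

def Spec_search (string : String) (lookup : String) (out : String) : Prop := out = search_alt string lookup
instance (string : String) (lookup : String) (out : String) : Decidable (Spec_search string lookup out) := by unfold Spec_search; infer_instance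

-- ===== CLAIM (what is proved, stated in full; the proofs are below) =====
def Claim_equal_search : Prop := ∀ (string : String) (lookup : String), Dom_search string lookup → Pre_search string lookup → Spec_search string lookup (search string lookup)

-- ===== LEMMAS AND PROOFS =====

-- Abstract form of A's scanning loop: the borders produced scanning the remaining
-- characters t at absolute position i with matcher state j and candidate start cur.
def bordA (lk : List Char) : List Char → Int → Int → Int → List (Int × Int)
  | [], _, _, _ => []
  | c :: t, i, j, cur =>
    if some c = PySem.List.pyGet? lk j then
      if j = (lk.length : Int) - 1 then
        ((if j = 0 then i else cur), i + 1) :: bordA lk t (i + 1) 0 (if j = 0 then i else cur)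
      else bordA lk t (i + 1) (j + 1) (if j = 0 then i else cur)
    else bordA lk t (i + 1) 0 cur

-- Well-formed border lists: chained, non-empty intervals inside [c, N].
def wfb (c N : Int) : List (Int × Int) → Prop
  | [] => True
  | (a, b) :: r => c ≤ a ∧ a < b ∧ b ≤ N ∧ wfb b N r

-- Clean reference insertion: left to right, in relative coordinates.
def mark : List (Int × Int) → List Char → List Char
  | [], s => s
  | (a, b) :: r, s =>
      s.take a.toNat ++ '_' :: ((s.drop a.toNat).take (b.toNat - a.toNat) ++
        '_' :: mark (r.map (fun p => (p.1 - b, p.2 - b))) (s.drop b.toNat))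
  termination_by l _ => l.length
  decreasing_by simp

theorem pyRange_one_nil {a b : Int} (h : b ≤ a) : PySem.List.pyRange a b 1 = [] := by
  simp [PySem.List.pyRange, show ¬ a < b by omega]

theorem bordA_cur (lk : List Char) :
    ∀ (t : List Char) (i cur cur' : Int), bordA lk t i 0 cur = bordA lk t i 0 cur' := by
  intro t
  induction t with
  | nil => intro i cur cur'; rfl
  | cons c t ih =>
    intro i cur cur'
    simp only [bordA]
    split
    · rfl
    · exact ih (i + 1) cur cur'

theorem bordA_shift (lk : List Char) :
    ∀ (t : List Char) (i j cur d : Int),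
      bordA lk t (i + d) j (cur + d) =
        (bordA lk t i j cur).map (fun p => (p.1 + d, p.2 + d)) := by
  intro t
  induction t with
  | nil => intro i j cur d; rfl
  | cons c t ih =>
    intro i j cur d
    simp only [bordA]
    by_cases hm : some c = PySem.List.pyGet? lk j
    · simp only [if_pos hm]
      have hcur : (if j = 0 then i + d else cur + d) = (if j = 0 then i else cur) + d := by
        split <;> rfl
      rw [hcur]
      by_cases hjf : j = (lk.length : Int) - 1
      · simp only [if_pos hjf, List.map_cons]
        rw [show i + d + 1 = i + 1 + d by ring]
        exact congrArg _ (ih (i + 1) 0 (if j = 0 then i else cur) d)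
      · simp only [if_neg hjf]
        rw [show i + d + 1 = i + 1 + d by ring]
        exact ih (i + 1) (j + 1) (if j = 0 then i else cur) d
    · simp only [if_neg hm]
      rw [show i + d + 1 = i + 1 + d by ring]
      exact ih (i + 1) 0 cur d

theorem wfb_mono {c' c N : Int} (h : c' ≤ c) : ∀ {l}, wfb c N l → wfb c' N l := by
  intro l hl
  cases l with
  | nil => trivial
  | cons p r => obtain ⟨h1, h2⟩ := hl; exact ⟨le_trans h h1, h2⟩

theorem wfb_monoN {N N' : Int} (h : N ≤ N') :
    ∀ {l} {c : Int}, wfb c N l → wfb c N' l := by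
  intro l
  induction l with
  | nil => intro c _; trivial
  | cons p r ih =>
    intro c hl
    obtain ⟨h1, h2, h3, h4⟩ := hl
    exact ⟨h1, h2, le_trans h3 h, ih h4⟩

theorem wfb_shift (d : Int) :
    ∀ {l} {c N : Int}, wfb c N l → wfb (c + d) (N + d) (l.map (fun p => (p.1 + d, p.2 + d))) := by
  intro l
  induction l with
  | nil => intro c N _; trivial
  | cons p r ih =>
    intro c N h
    obtain ⟨h1, h2, h3, h4⟩ := h
    exact ⟨by omega, by omega, by omega, ih h4⟩

theorem bordA_wf (lk : List Char) :
    ∀ (t : List Char) (i j N : Int), 0 ≤ j → j ≤ i → i + (t.length : Int) ≤ N →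
      wfb (i - j) N (bordA lk t i j (i - j)) := by
  intro t
  induction t with
  | nil => intro i j N _ _ _; trivial
  | cons c t ih =>
    intro i j N h0 hji hN
    have hN' : i + 1 + (t.length : Int) ≤ N := by
      simp only [List.length_cons] at hN; push_cast at hN ⊢; omega
    simp only [bordA]
    by_cases hm : some c = PySem.List.pyGet? lk j
    · simp only [if_pos hm]
      have hcur : (if j = 0 then i else i - j) = i - j := by split <;> omega
      rw [hcur]
      by_cases hjf : j = (lk.length : Int) - 1
      · simp only [if_pos hjf]
        refine ⟨le_refl _, by omega, by omega, ?_⟩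
        rw [bordA_cur lk t (i + 1) (i - j) (i + 1 - 0)]
        exact wfb_mono (by omega) (ih (i + 1) 0 N (by omega) (by omega) hN')
      · simp only [if_neg hjf]
        have := ih (i + 1) (j + 1) N (by omega) (by omega) hN'
        rw [show i + 1 - (j + 1) = i - j by ring] at this
        exact this
    · simp only [if_neg hm]
      rw [bordA_cur lk t (i + 1) (i - j) (i + 1 - 0)]
      exact wfb_mono (by omega) (ih (i + 1) 0 N (by omega) (by omega) hN')

theorem loopA_eq (s lk : List Char) :
    ∀ (t : List Char) (i : Nat) (bs : List (Int × Int)) (j cs ce : Int),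
      s.drop i = t →
      ((PySem.List.pyRange (i : Int) (s.length : Int) 1).foldl
        (searchStepA s lk) (bs, j, (cs, ce))).1 = bs ++ bordA lk t (i : Int) j cs := by
  intro t
  induction t with
  | nil =>
    intro i bs j cs ce hdrop
    have hlen : s.length ≤ i := List.drop_eq_nil_iff.mp hdrop
    rw [pyRange_one_nil (by exact_mod_cast hlen)]
    simp [bordA]
  | cons c t ih =>
    intro i bs j cs ce hdrop
    have hi : i < s.length := by
      by_contra h
      rw [List.drop_eq_nil_iff.mpr (by omega)] at hdrop
      exact List.cons_ne_nil c t hdrop.symm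
    have hget : PySem.List.pyGet? s (i : Int) = some c := by
      have h0 : s[i]? = some c := by
        have h1 : (s.drop i)[0]? = some c := by rw [hdrop]; rfl
        simpa [List.getElem?_drop] using h1
      simp [pysem, h0]
    have hdrop' : s.drop (i + 1) = t := by
      have h1 := congrArg (List.drop 1) hdrop
      simpa [List.drop_drop, Nat.add_comm] using h1
    have hcast : ((i + 1 : ℕ) : Int) = (i : Int) + 1 := by push_cast; ring
    rw [PySem.List.pyRange_one_cons (by exact_mod_cast hi), List.foldl_cons]
    simp only [searchStepA, hget]
    by_cases hm : some c = PySem.List.pyGet? lk j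
    · simp only [if_pos hm, bordA]
      have hfst : (if j = 0 then ((i : Int), (-1 : Int)) else (cs, ce)).1
          = if j = 0 then (i : Int) else cs := apply_ite Prod.fst _ _ _
      by_cases hjf : j = (lk.length : Int) - 1
      · simp only [if_pos hjf]
        have := ih (i + 1) (bs ++ [((if j = 0 then ((i : Int), (-1 : Int)) else (cs, ce)).1, (i : Int) + 1)])
          0 (if j = 0 then ((i : Int), (-1 : Int)) else (cs, ce)).1 ((i : Int) + 1) hdrop'
        rw [hcast] at this
        rw [this, hfst]
        rw [bordA_cur lk t ((i : Int) + 1) (if j = 0 then (i : Int) else cs) cs]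
        simp
      · simp only [if_neg hjf]
        have := ih (i + 1) bs (j + 1) (if j = 0 then ((i : Int), (-1 : Int)) else (cs, ce)).1
          (if j = 0 then ((i : Int), (-1 : Int)) else (cs, ce)).2 hdrop'
        rw [hcast] at this
        rw [this, hfst]
    · simp only [if_neg hm, bordA]
      have := ih (i + 1) bs 0 cs ce hdrop'
      rw [hcast] at this
      rw [this]

theorem stepB_out (lk : List Char) (out buf : List Char) (j : Int) (c : Char) :
    searchStepB lk (out, buf, j) c =
      (out ++ (searchStepB lk ([], buf, j) c).1, (searchStepB lk ([], buf, j) c).2) := by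
  simp only [searchStepB]
  split
  · split <;> simp
  · simp

theorem foldB_out (lk : List Char) :
    ∀ (t out buf : List Char) (j : Int),
      t.foldl (searchStepB lk) (out, buf, j) =
        (out ++ (t.foldl (searchStepB lk) ([], buf, j)).1,
          (t.foldl (searchStepB lk) ([], buf, j)).2) := by
  intro t
  induction t with
  | nil => intro out buf j; simp
  | cons c t ih =>
    intro out buf j
    simp only [List.foldl_cons]
    rw [stepB_out]
    obtain ⟨f1, f2, f3⟩ := searchStepB lk ([], buf, j) c
    rw [ih (out ++ f1) f2 f3, ih f1 f2 f3]
    simp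

theorem mark_shift (l : List (Int × Int)) (P s : List Char) (hwf : wfb 0 (s.length : Int) l) :
    mark (l.map (fun p => (p.1 + (P.length : Int), p.2 + (P.length : Int)))) (P ++ s) =
      P ++ mark l s := by
  cases l with
  | nil => simp [mark]
  | cons p r =>
    obtain ⟨a, b⟩ := p
    obtain ⟨h0, hab, hbl, hr⟩ := hwf
    simp only [List.map_cons, mark]
    have hA : (a + (P.length : Int)).toNat = P.length + a.toNat := by omega
    have hB : (b + (P.length : Int)).toNat = P.length + b.toNat := by omega
    rw [hA, hB, show P.length + b.toNat - (P.length + a.toNat) = b.toNat - a.toNat by omega,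
      List.take_length_add_append, List.drop_length_add_append, List.drop_length_add_append]
    have hmap : (r.map (fun p => (p.1 + (P.length : Int), p.2 + (P.length : Int)))).map
        (fun p => (p.1 - (b + (P.length : Int)), p.2 - (b + (P.length : Int))))
        = r.map (fun p => (p.1 - b, p.2 - b)) := by
      rw [List.map_map]; congr 1; funext p; simp only [Function.comp_apply, Prod.mk.injEq]; constructor <;> ring
    rw [hmap]
    simp [List.append_assoc]

theorem insertA_eq_mark : ∀ (n : Nat) (l : List (Int × Int)) (s : List Char),
    l.length ≤ n → wfb 0 (s.length : Int) l → searchInsertA l s = mark l s := by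
  intro n
  induction n with
  | zero =>
    intro l s hlen _
    have : l = [] := List.eq_nil_of_length_eq_zero (Nat.le_zero.mp hlen)
    subst this; simp [searchInsertA, mark]
  | succ n ih =>
    intro l s hlen hwf
    cases l with
    | nil => simp [searchInsertA, mark]
    | cons p r =>
      obtain ⟨a, b⟩ := p
      obtain ⟨h0, hab, hbl, hr⟩ := hwf
      have haN : a.toNat ≤ s.length := by omega
      have hbN : b.toNat ≤ s.length := by omega
      -- turn the slices of the port into take/drop
      have hs1 : PySem.List.slice s (some 0) (some a) = s.take a.toNat := by
        rw [PySem.List.slice_zero_start, PySem.List.slice_to _ (by omega)]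
      have hs2 : PySem.List.slice s (some a) (some b)
          = (s.drop a.toNat).take (b.toNat - a.toNat) :=
        PySem.List.slice_toNat _ (by omega) (by omega)
      have hs3 : PySem.List.slice s (some b) (some (s.length : Int)) = s.drop b.toNat := by
        rw [PySem.List.slice_toNat _ (by omega) (by omega)]
        rw [Int.toNat_natCast]
        exact List.take_of_length_le (by simp)
      have hseg : ((s.drop a.toNat).take (b.toNat - a.toNat)).length = b.toNat - a.toNat := by
        simp; omega
      set P : List Char := s.take a.toNat ++ '_' ::
        ((s.drop a.toNat).take (b.toNat - a.toNat) ++ ['_']) with hP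
      have hPlenN : P.length = b.toNat + 2 := by
        rw [hP]; simp only [List.length_append, List.length_cons, hseg, List.length_take, List.length_nil]
        omega
      have hPlen : (P.length : Int) = b + 2 := by rw [hPlenN]; omega
      have hs' : PySem.List.slice s (some 0) (some a) ++ '_' ::
          (PySem.List.slice s (some a) (some b) ++ '_' ::
            PySem.List.slice s (some b) (some (s.length : Int)))
          = P ++ s.drop b.toNat := by
        rw [hs1, hs2, hs3, hP]; simp
      have hmap : r.map (fun p => (p.1 + 2, p.2 + 2))
          = (r.map (fun p => (p.1 - b, p.2 - b))).map
              (fun p => (p.1 + (P.length : Int), p.2 + (P.length : Int))) := by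
        rw [List.map_map]; congr 1; funext p; rw [hPlen]
        simp only [Function.comp_apply, Prod.mk.injEq]
        constructor <;> ring
      have hdlen : ((s.drop b.toNat).length : Int) = (s.length : Int) - b := by
        simp; omega
      have hwfr : wfb 0 ((s.drop b.toNat).length : Int) (r.map (fun p => (p.1 - b, p.2 - b))) := by
        have := wfb_shift (-b) hr
        rw [show b + -b = (0 : Int) by ring] at this
        rw [hdlen]
        simpa [sub_eq_add_neg] using this
      have hwfs : wfb 0 (((P ++ s.drop b.toNat).length : Int))
          (r.map (fun p => (p.1 + 2, p.2 + 2))) := by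
        have := wfb_shift 2 hr
        refine wfb_mono (by omega) (wfb_monoN ?_ this)
        push_cast [List.length_append]
        omega
      rw [show searchInsertA ((a, b) :: r) s
          = searchInsertA (r.map (fun p => (p.1 + 2, p.2 + 2)))
              (PySem.List.slice s (some 0) (some a) ++ '_' ::
                (PySem.List.slice s (some a) (some b) ++ '_' ::
                  PySem.List.slice s (some b) (some (s.length : Int)))) from by
        simp only [searchInsertA]]
      rw [hs']
      rw [ih _ _ (by simpa using Nat.le_of_succ_le_succ hlen) hwfs]
      rw [hmap, mark_shift _ _ _ hwfr]
      simp only [mark]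
      rw [hP]; simp [List.append_assoc]

theorem mainScan (lk : List Char) (hlk : lk ≠ []) :
    ∀ (t buf : List Char) (j : Int), j = (buf.length : Int) → j < (lk.length : Int) →
      mark (bordA lk t ((buf.length : Nat) : Int) j 0) (buf ++ t) =
        (t.foldl (searchStepB lk) ([], buf, j)).1 ++
          (t.foldl (searchStepB lk) ([], buf, j)).2.1 := by
  intro t
  induction t with
  | nil => intro buf j hj hjl; simp [bordA, mark]
  | cons c t ih =>
    intro buf j hj hjl
    have hbc : buf ++ c :: t = (buf ++ [c]) ++ t := by simp
    have hlen1 : (((buf ++ [c]).length : Nat) : Int) = (buf.length : Int) + 1 := by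
      push_cast [List.length_append, List.length_singleton]; ring
    simp only [bordA, List.foldl_cons, searchStepB]
    by_cases hm : some c = PySem.List.pyGet? lk j
    · simp only [if_pos hm]
      have hcur : (if j = 0 then ((buf.length : Nat) : Int) else (0 : Int)) = 0 := by
        split <;> omega
      rw [hcur]
      by_cases hjf : j = (lk.length : Int) - 1
      · simp only [if_pos hjf]
        -- the completed match: border (0, buf.length + 1)
        have hnorm : bordA lk t ((buf.length : Int) + 1) 0 0
            = (bordA lk t 0 0 0).map
                (fun p => (p.1 + ((buf.length : Int) + 1), p.2 + ((buf.length : Int) + 1))) := by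
          have := bordA_shift lk t 0 0 (-((buf.length : Int) + 1)) ((buf.length : Int) + 1)
          rw [show (0 : Int) + ((buf.length : Int) + 1) = (buf.length : Int) + 1 by ring,
            show -((buf.length : Int) + 1) + ((buf.length : Int) + 1) = (0 : Int) by ring] at this
          rw [this, bordA_cur lk t 0 (-((buf.length : Int) + 1)) 0]
        simp only [mark, hnorm]
        have ht0 : ((0 : Int)).toNat = 0 := rfl
        have htb : (((buf.length : Int) + 1)).toNat = buf.length + 1 := by omega
        rw [ht0, htb]
        simp only [List.take_zero, List.drop_zero]
        have htake : (buf ++ c :: t).take (buf.length + 1 - 0) = buf ++ [c] := by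
          rw [hbc, Nat.sub_zero, show buf.length + 1 = (buf ++ [c]).length by simp,
            List.take_left]
        have hdrop : (buf ++ c :: t).drop (buf.length + 1) = t := by
          rw [hbc, show buf.length + 1 = (buf ++ [c]).length by simp, List.drop_left]
        rw [htake, hdrop]
        have hmap : ((bordA lk t 0 0 0).map
            (fun p => (p.1 + ((buf.length : Int) + 1), p.2 + ((buf.length : Int) + 1)))).map
            (fun p => (p.1 - ((buf.length : Int) + 1), p.2 - ((buf.length : Int) + 1)))
            = bordA lk t 0 0 0 := by
          rw [List.map_map]
          have : ((fun p : Int × Int => (p.1 - ((buf.length : Int) + 1), p.2 - ((buf.length : Int) + 1)))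
              ∘ (fun p : Int × Int => (p.1 + ((buf.length : Int) + 1), p.2 + ((buf.length : Int) + 1))))
              = id := by
            funext p
            simp only [Function.comp_apply, id_eq, Prod.ext_iff]
            constructor <;> ring
          rw [this, List.map_id]
        rw [hmap]
        have hIH := ih [] 0 (by simp) (by
          have : 0 < lk.length := List.length_pos_of_ne_nil hlk
          exact_mod_cast this)
        simp only [List.length_nil, Nat.cast_zero, List.nil_append] at hIH
        rw [foldB_out, hIH]
        simp [List.append_assoc]
      · simp only [if_neg hjf]
        have hIH := ih (buf ++ [c]) (j + 1) (by rw [hlen1]; omega) (by omega)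
        rw [hlen1] at hIH
        rw [hbc]
        exact hIH
    · simp only [if_neg hm]
      have hnorm : bordA lk t ((buf.length : Int) + 1) 0 0
          = (bordA lk t 0 0 0).map
              (fun p => (p.1 + ((buf.length : Int) + 1), p.2 + ((buf.length : Int) + 1))) := by
        have := bordA_shift lk t 0 0 (-((buf.length : Int) + 1)) ((buf.length : Int) + 1)
        rw [show (0 : Int) + ((buf.length : Int) + 1) = (buf.length : Int) + 1 by ring,
          show -((buf.length : Int) + 1) + ((buf.length : Int) + 1) = (0 : Int) by ring] at this
        rw [this, bordA_cur lk t 0 (-((buf.length : Int) + 1)) 0]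
      have hwf : wfb 0 (t.length : Int) (bordA lk t 0 0 0) := by
        have := bordA_wf lk t 0 0 (t.length : Int) (le_refl 0) (le_refl 0) (by omega)
        rw [show (0 : Int) - 0 = 0 by ring] at this
        exact this
      rw [hnorm, hbc]
      rw [show (buf.length : Int) + 1 = (((buf ++ [c]).length : Nat) : Int) by rw [hlen1]]
      rw [mark_shift _ _ _ hwf]
      have hIH := ih [] 0 (by simp) (by
        have : 0 < lk.length := List.length_pos_of_ne_nil hlk
        exact_mod_cast this)
      simp only [List.length_nil, Nat.cast_zero, List.nil_append] at hIH
      rw [foldB_out, hIH]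
      simp [List.append_assoc]

-- ===== VERDICT (by name: the statement is the Claim_ definition above) =====
theorem search_spec : Claim_equal_search := by
  intro string lookup _ hpre
  unfold Spec_search search search_alt
  rcases hpre with hs | hlk
  · subst hs
    simp [searchInsertA]
  · have hlknil : lookup.toList ≠ [] := fun h => hlk (String.toList_eq_nil_iff.mp h)
    set s := string.toList
    set lk := lookup.toList
    have h1 : ((PySem.List.pyRange ((0 : Nat) : Int) (s.length : Int) 1).foldl
        (searchStepA s lk) ([], 0, (0, -1))).1 = [] ++ bordA lk s ((0 : Nat) : Int) 0 0 :=
      loopA_eq s lk s 0 [] 0 0 (-1) (by simp)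
    simp only [Nat.cast_zero, List.nil_append] at h1
    have hwf : wfb 0 (s.length : Int) (bordA lk s 0 0 0) := by
      have := bordA_wf lk s 0 0 (s.length : Int) (le_refl 0) (le_refl 0) (by omega)
      rw [show (0 : Int) - 0 = 0 by ring] at this
      exact this
    have hmain := mainScan lk hlknil s [] 0 (by simp) (by
      have : 0 < lk.length := List.length_pos_of_ne_nil hlknil
      exact_mod_cast this)
    simp only [List.length_nil, Nat.cast_zero, List.nil_append] at hmain
    simp only [h1]
    rw [insertA_eq_mark (bordA lk s 0 0 0).length _ _ (le_refl _) hwf, hmain]
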